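-- pv_equiv track=rewrite | github.com/GenryEden/kpolyakovName | 407.py | f
-- ===== SOURCE A (Python) =====
-- def f(x):
-- 	l = 0
-- 	m = 0
-- 	while x > 0:
-- 		l += 1
-- 		if m < x % 10:
-- 			m = x % 10
-- 		x //= 10
-- 	return l, m
-- ===== SOURCE B (Python) =====
-- def f(x):
--     if x <= 0:
--         return (0, 0)
--     s = str(x)
--     return (len(s), max(ord(c) - 48 for c in s))
-- ===== Notes on version B (the rewrite author's own statement) =====
-- stated objective: idiomatic
-- what changed: Replaces the digit-peeling mod/floordiv while loop with the string form of x: len(str(x)) gives the digit count and a max over the characters gives the largest digit; non-positive x returns (0,0) exactly as A's empty loop does.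
import Mathlib
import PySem

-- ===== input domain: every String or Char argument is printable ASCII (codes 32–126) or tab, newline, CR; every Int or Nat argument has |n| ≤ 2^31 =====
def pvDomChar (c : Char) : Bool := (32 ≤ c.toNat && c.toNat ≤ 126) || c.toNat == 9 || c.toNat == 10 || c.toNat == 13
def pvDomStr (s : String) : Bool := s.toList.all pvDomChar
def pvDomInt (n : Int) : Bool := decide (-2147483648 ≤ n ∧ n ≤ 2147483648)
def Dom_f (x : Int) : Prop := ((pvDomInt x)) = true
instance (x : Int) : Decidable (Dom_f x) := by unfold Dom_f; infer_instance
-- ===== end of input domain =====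

-- B replaces A's digit-peeling mod/floordiv loop with the string form of x:
-- len(str(x)) for the count and a max over the characters for the largest digit (idiomatic).


-- ===== PORT A =====
-- the decreasing measure of the while loop (cited by `decreasing_by` below)
theorem fLoop_measure (x : Int) (h : 0 < x) :
    (PySem.Int.floordiv x 10).toNat < x.toNat := by
  have : PySem.Int.floordiv x 10 = x / 10 := by
    unfold PySem.Int.floordiv; rw [Int.fdiv_eq_ediv]; omega
  rw [this]; omega

-- `while x > 0: l += 1; if m < x % 10: m = x % 10; x //= 10`
def fLoop (x l m : Int) : Int × Int :=
  if h : 0 < x then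
    fLoop (PySem.Int.floordiv x 10) (l + 1)
      (if m < PySem.Int.mod x 10 then PySem.Int.mod x 10 else m)
  else (l, m)
termination_by x.toNat
decreasing_by exact fLoop_measure x h

def f (x : Int) : Int × Int := fLoop x 0 0

-- ===== PORT B =====
def f_alt (x : Int) : Int × Int :=
  if x ≤ 0 then (0, 0)
  else
    -- s = str(x)
    let s := PySem.Int.toChars x
    -- (len(s), max(ord(c) - 48 for c in s)); x > 0 makes s nonempty, so Python's max returns
    ((s.length : Int),
      ((PySem.List.max? (s.map (fun c => ((c.toNat : Int) - 48))) (fun v => v)).getD 0))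

-- ===== PRECONDITION & SPEC =====
def Spec_f (x : Int) (out : Int × Int) : Prop := out = f_alt x
instance (x : Int) (out : Int × Int) : Decidable (Spec_f x out) := by unfold Spec_f; infer_instance

-- ===== CLAIM (what is proved, stated in full; the proofs are below) =====
def Claim_equal_f : Prop := ∀ (x : Int), Dom_f x → Spec_f x (f x)

-- ===== LEMMAS AND PROOFS =====

-- the list of base-10 digits of n, as integers (least-significant first)
def dmap (l : List ℕ) : List Int := l.map Int.ofNat

theorem step_eq (a b : Int) : (if a < b then b else a) = max a b := by
  rw [max_def]; split_ifs <;> omega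

theorem fdiv_natCast (n : ℕ) : ((n : Int).fdiv 10) = ((n / 10 : ℕ) : Int) := by
  rw [Int.fdiv_eq_ediv]; omega

theorem fmod_natCast (n : ℕ) : ((n : Int).fmod 10) = ((n % 10 : ℕ) : Int) := by
  rw [Int.fmod_eq_emod]; omega

-- `Nat.toDigits` (hence `str`) produces the reversed base-10 digit list, mapped to chars
theorem toDigitsCore_eq (n : ℕ) : ∀ (fuel : ℕ) (l : List Char), n < fuel → 0 < n →
    Nat.toDigitsCore 10 fuel n l = ((Nat.digits 10 n).map Nat.digitChar).reverse ++ l := by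
  induction n using Nat.strong_induction_on with
  | _ n ih =>
    intro fuel l hfuel hn
    obtain ⟨fuel, rfl⟩ : ∃ g, fuel = g + 1 := ⟨fuel - 1, by omega⟩
    rw [Nat.toDigitsCore, Nat.digits_def' (by norm_num : 1 < 10) hn]
    by_cases h0 : n / 10 = 0
    · simp [h0]
    · simp only [h0, if_false]
      rw [ih (n / 10) (by omega) fuel _ (by omega) (by omega)]
      simp

theorem toDigits_eq (n : ℕ) (hn : 0 < n) :
    Nat.toDigits 10 n = ((Nat.digits 10 n).map Nat.digitChar).reverse := by
  rw [Nat.toDigits, toDigitsCore_eq n (n + 1) [] (by omega) hn, List.append_nil]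

theorem digitChar_toNat (d : ℕ) (h : d < 10) : (Nat.digitChar d).toNat = 48 + d := by
  interval_cases d <;> decide

-- A's loop computes (l + #digits, fold of `max` over the digits starting from m)
theorem fLoop_eq_digits (n : ℕ) : ∀ (l m : Int), 0 < n →
    fLoop (n : Int) l m
      = (l + ((Nat.digits 10 n).length : Int), (dmap (Nat.digits 10 n)).foldl max m) := by
  induction n using Nat.strong_induction_on with
  | _ n ih =>
    intro l m hn
    rw [fLoop]
    have hx : (0 : Int) < (n : Int) := by exact_mod_cast hn
    simp only [hx, dif_pos]
    simp only [PySem.Int.mod, PySem.Int.floordiv, fmod_natCast, fdiv_natCast, step_eq]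
    rw [Nat.digits_def' (by norm_num : 1 < 10) hn]
    by_cases h0 : n / 10 = 0
    · rw [h0]
      rw [fLoop]
      have hdig0 : Nat.digits 10 (n / 10) = [] := by rw [h0]; rfl
      simp [dmap, Int.ofNat_eq_natCast]
    · rw [ih (n / 10) (by omega) _ _ (by omega)]
      simp only [dmap, List.map_cons, List.length_cons, List.foldl_cons, Prod.mk.injEq,
        Int.ofNat_eq_natCast]
      constructor
      · push_cast; ring
      · trivial

-- PySem's max? over a nonempty list with identity key is a fold of `max`
theorem max?_foldl (a : Int) (l : List Int) :
    PySem.List.max? (a :: l) (fun v => v) = some (l.foldl max a) := by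
  unfold PySem.List.max?
  simp only [List.foldl_cons]
  induction l generalizing a with
  | nil => rfl
  | cons b l ih =>
    simp only [List.foldl_cons]
    by_cases h : a < b
    · rw [if_pos h, max_eq_right h.le]
      exact ih b
    · rw [if_neg h, max_eq_left (not_lt.mp h)]
      exact ih a

theorem foldl_max_swap (l : List Int) : ∀ (m b : Int),
    l.foldl max (max m b) = max (l.foldl max m) b := by
  induction l with
  | nil => intro m b; rfl
  | cons a l ih =>
    intro m b
    simp only [List.foldl_cons]
    rw [max_right_comm, ih]

theorem foldl_max_reverse (l : List Int) : ∀ (m : Int),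
    l.reverse.foldl max m = l.foldl max m := by
  induction l with
  | nil => intro m; rfl
  | cons a l ih =>
    intro m
    rw [List.reverse_cons, List.foldl_append, ih, List.foldl_cons, List.foldl_nil,
      List.foldl_cons, foldl_max_swap]

-- the chars of str(x) map back to the digits of x
theorem map_chars_eq (l : List ℕ) (h : ∀ d ∈ l, d < 10) :
    (l.map Nat.digitChar).map (fun c => ((c.toNat : Int) - 48)) = dmap l := by
  induction l with
  | nil => rfl
  | cons d l ih =>
    simp only [List.map_cons, dmap] at *
    congr 1
    · rw [digitChar_toNat d (h d (List.mem_cons_self)), Int.ofNat_eq_natCast]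
      push_cast
      ring
    · exact ih (fun d hd => h d (List.mem_cons_of_mem _ hd))

-- ===== VERDICT (by name: the statement is the Claim_ definition above) =====
theorem f_spec : Claim_equal_f := by
  intro x _
  unfold Spec_f f f_alt
  by_cases hx : x ≤ 0
  · rw [fLoop]
    simp [hx]
  · replace hx : 0 < x := by omega
    obtain ⟨n, rfl⟩ : ∃ n : ℕ, x = (n : Int) := ⟨x.toNat, by omega⟩
    have hn : 0 < n := by exact_mod_cast hx
    rw [fLoop_eq_digits n 0 0 hn]
    have hneg : ¬ ((n : Int) < 0) := by omega
    have hle : ¬ ((n : Int) ≤ 0) := by omega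
    simp only [PySem.Int.toChars, hneg, if_false, Int.toNat_natCast, hle]
    rw [toDigits_eq n hn]
    have hmap : (((Nat.digits 10 n).map Nat.digitChar).reverse.map
        (fun c => ((c.toNat : Int) - 48))) = (dmap (Nat.digits 10 n)).reverse := by
      rw [List.map_reverse, map_chars_eq _ (fun d hd => Nat.digits_lt_base (by norm_num) hd)]
    obtain ⟨hd, tl, hds⟩ : ∃ hd tl, (dmap (Nat.digits 10 n)).reverse = hd :: tl := by
      rcases hrev : (dmap (Nat.digits 10 n)).reverse with _ | ⟨hd, tl⟩
      · exfalso
        have h1 : Nat.digits 10 n ≠ [] := Nat.digits_ne_nil_iff_ne_zero.mpr (by omega)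
        have h2 := congrArg List.length hrev
        simp only [dmap, List.length_reverse, List.length_map, List.length_nil] at h2
        exact h1 (List.eq_nil_of_length_eq_zero h2)
      · exact ⟨hd, tl, rfl⟩
    have hd0 : 0 ≤ hd := by
      have hmem : hd ∈ (dmap (Nat.digits 10 n)).reverse := by
        rw [hds]; exact List.mem_cons_self
      rw [List.mem_reverse, dmap, List.mem_map] at hmem
      obtain ⟨k, -, hk⟩ := hmem
      rw [← hk]
      simp [Int.ofNat_eq_natCast]
    simp only [hmap, hds, max?_foldl, Option.getD_some, List.length_reverse,
      List.length_map, Prod.mk.injEq]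
    constructor
    · simp
    · have h2 : tl.foldl max hd = (hd :: tl).foldl max 0 := by
        simp only [List.foldl_cons, max_eq_right hd0]
      rw [h2, ← hds, foldl_max_reverse]
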